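-- pv_equiv track=rewrite | github.com/papaiza/AlgorithmsPractise | multiply_1.py | createU
-- ===== SOURCE A (Python) =====
-- def createU(x, y):
-- 	i = 0
-- 	u = []
-- 	v = []
-- 	u.append(1)
-- 	v.append(y)
-- 	while u[i] <= x:
-- 		i += 1
-- 		u.append(u[i - 1] + u[i-1])
-- 		v.append(v[i-1]+ v[i-1])
-- 	return u, v, i
-- ===== SOURCE B (Python) =====
-- def createU(x, y):
--     # count doublings with a scalar loop, then build u and v separately
--     i = 0
--     val = 1
--     while val <= x:
--         val += val
--         i += 1
--     u = [2 ** j for j in range(i + 1)]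
--     v = []
--     cur = y
--     for _ in range(i + 1):
--         v.append(cur)
--         cur += cur
--     return u, v, i
-- ===== Notes on version B (the rewrite author's own statement) =====
-- stated objective: alternative
-- what changed: B first computes the iteration count with a scalar doubling loop, then builds u as a closed-form power-of-two comprehension and v with an independent self-addition loop, instead of A's single loop growing both lists by indexing into them.
import Mathlib
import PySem

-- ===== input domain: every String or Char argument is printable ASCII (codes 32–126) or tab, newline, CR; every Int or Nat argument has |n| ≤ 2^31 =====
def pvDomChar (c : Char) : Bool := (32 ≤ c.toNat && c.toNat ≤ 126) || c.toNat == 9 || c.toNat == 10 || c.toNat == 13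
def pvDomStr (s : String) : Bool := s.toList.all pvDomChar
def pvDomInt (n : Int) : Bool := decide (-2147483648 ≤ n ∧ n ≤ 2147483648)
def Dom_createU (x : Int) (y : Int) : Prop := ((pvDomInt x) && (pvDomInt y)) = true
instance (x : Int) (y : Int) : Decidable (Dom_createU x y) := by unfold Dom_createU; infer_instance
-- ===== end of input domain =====

-- B computes the loop count with a scalar doubling loop, then builds u as powers of two
-- and v with an independent self-addition loop (objective: alternative decomposition).


-- ===== PORT A =====
-- A's while loop; cu/cv carry u[i]/v[i] (the last appended elements), which A re-reads
-- by index; 0 < cu is the termination invariant (u[i] is always a power of two).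
def createU_loopA (x : Int) (u v : List Int) (cu cv i : Int) (h : 0 < cu) :
    List Int × List Int × Int :=
  if hc : cu ≤ x then
    createU_loopA x (u ++ [cu + cu]) (v ++ [cv + cv]) (cu + cu) (cv + cv) (i + 1)
      (by omega)
  else
    (u, v, i)
termination_by (x + 1 - cu).toNat
decreasing_by omega

def createU (x : Int) (y : Int) : List Int × List Int × Int :=
  createU_loopA x [1] [y] 1 y 0 (by omega)

-- ===== PORT B =====
-- B's scalar count loop: val = 1; while val <= x: val += val; i += 1
def createU_count (x val i : Int) (h : 0 < val) : Int :=
  if hc : val ≤ x then createU_count x (val + val) (i + 1) (by omega) else i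
termination_by (x + 1 - val).toNat
decreasing_by omega

-- B's v loop: append cur, then cur += cur
def createU_buildV (c : Int) : Nat → List Int
  | 0 => []
  | n + 1 => c :: createU_buildV (c + c) n

def createU_alt (x : Int) (y : Int) : List Int × List Int × Int :=
  let i := createU_count x 1 0 (by omega)
  ((List.range (i.toNat + 1)).map (fun j => (2 : Int) ^ j),
   createU_buildV y (i.toNat + 1), i)

-- ===== PRECONDITION & SPEC =====
def Spec_createU (x : Int) (y : Int) (out : List Int × List Int × Int) : Prop := out = createU_alt x y
instance (x : Int) (y : Int) (out : List Int × List Int × Int) : Decidable (Spec_createU x y out) := by unfold Spec_createU; infer_instance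

-- ===== CLAIM (what is proved, stated in full; the proofs are below) =====
def Claim_equal_createU : Prop := ∀ (x : Int) (y : Int), Dom_createU x y → Spec_createU x y (createU x y)

-- ===== LEMMAS AND PROOFS =====

-- number of doublings (proof-side mirror of both loops)
def pvCnt (x val : Int) (h : 0 < val) : Nat :=
  if hc : val ≤ x then pvCnt x (val + val) (by omega) + 1 else 0
termination_by (x + 1 - val).toNat
decreasing_by omega

-- tail of doubled values starting after c
def pvDbl (c : Int) : Nat → List Int
  | 0 => []
  | n + 1 => (c + c) :: pvDbl (c + c) n

theorem createU_count_eq_cnt (x val i : Int) (h : 0 < val) :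
    createU_count x val i h = i + (pvCnt x val h : Int) := by
  fun_induction createU_count x val i h with
  | case1 val i h hc ih =>
      rw [pvCnt, dif_pos hc, ih]; push_cast; ring
  | case2 val i h hc =>
      rw [pvCnt, dif_neg hc]; simp

theorem createU_loopA_eq (x : Int) (u v : List Int) (cu cv i : Int) (h : 0 < cu) :
    createU_loopA x u v cu cv i h =
      (u ++ pvDbl cu (pvCnt x cu h), v ++ pvDbl cv (pvCnt x cu h),
       i + (pvCnt x cu h : Int)) := by
  fun_induction createU_loopA x u v cu cv i h with
  | case1 u v cu cv i h hc ih =>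
      rw [pvCnt, dif_pos hc, ih]
      refine Prod.ext ?_ (Prod.ext ?_ ?_)
      · simp [pvDbl]
      · simp [pvDbl]
      · show i + 1 + _ = i + _
        push_cast; ring
  | case2 u v cu cv i h hc =>
      rw [pvCnt, dif_neg hc]; simp [pvDbl]

theorem cons_pvDbl (c : Int) (n : Nat) :
    c :: pvDbl c n = createU_buildV c (n + 1) := by
  induction n generalizing c with
  | zero => simp [pvDbl, createU_buildV]
  | succ n ih => rw [pvDbl, createU_buildV, ← ih]

theorem buildV_pow (n k : Nat) :
    createU_buildV ((2 : Int) ^ k) n = (List.range n).map (fun j => (2 : Int) ^ (j + k)) := by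
  induction n generalizing k with
  | zero => simp [createU_buildV]
  | succ n ih =>
      rw [createU_buildV]
      have h2 : (2 : Int) ^ k + 2 ^ k = 2 ^ (k + 1) := by ring
      rw [h2, ih (k + 1), List.range_succ_eq_map]
      simp only [List.map_cons, List.map_map]
      congr 1
      · norm_num
      · refine List.map_congr_left fun j _ => ?_
        congr 1
        omega

-- ===== VERDICT (by name: the statement is the Claim_ definition above) =====
theorem createU_spec : Claim_equal_createU := by
  intro x y _
  unfold Spec_createU createU createU_alt
  rw [createU_loopA_eq, createU_count_eq_cnt]
  set n := pvCnt x 1 (by omega)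
  have htn : ((0 : Int) + (n : Int)).toNat = n := by omega
  simp only [htn]
  refine Prod.ext ?_ (Prod.ext ?_ rfl)
  · show ([1] : List Int) ++ pvDbl 1 n = _
    have h1 : ([1] : List Int) ++ pvDbl 1 n = createU_buildV ((2:Int)^0) (n + 1) := by
      simpa using cons_pvDbl 1 n
    rw [h1, buildV_pow]
    simp
  · show ([y] : List Int) ++ pvDbl y n = createU_buildV y (n + 1)
    simpa using cons_pvDbl y n
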